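-- pv_equiv track=rewrite | github.com/MulEnzo/Lista-2-Python | l2q12.py | sublista
-- ===== SOURCE A (Python) =====
-- def sublista(lista_1,lista_2):
--     lista_auxiliar = []
--     for i in range(len(lista_2)):
--         if lista_2[i] in lista_1:
--             lista_auxiliar.append(lista_2[i])
--
--     if lista_1 == lista_auxiliar:
--         return True
--     else:
--         return False
-- ===== SOURCE B (Python) =====
-- def sublista(lista_1, lista_2):
--     # lista_1 equals the members-filter of lista_2 iff the per-value counts of
--     # members agree (multiset equality) and lista_1 is a subsequence of lista_2.
--     need = {}
--     for v in lista_1: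
--         need[v] = need.get(v, 0) + 1
--     have = {}
--     for v in lista_2:
--         if v in need:
--             have[v] = have.get(v, 0) + 1
--     if need != have:
--         return False
--     it = iter(lista_2)
--     return all(v in it for v in lista_1)
-- ===== Notes on version B (the rewrite author's own statement) =====
-- stated objective: faster
-- what changed: Replaces A's build-a-filtered-copy-and-compare-wholesale by a different characterisation of the same predicate: two counting dicts establish that lista_1 and the members of lista_2 agree as multisets, and a consuming-iterator pass checks lista_1 is a subsequence of lista_2; together these are equivalent to list equality with the filter.
import Mathlib
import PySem

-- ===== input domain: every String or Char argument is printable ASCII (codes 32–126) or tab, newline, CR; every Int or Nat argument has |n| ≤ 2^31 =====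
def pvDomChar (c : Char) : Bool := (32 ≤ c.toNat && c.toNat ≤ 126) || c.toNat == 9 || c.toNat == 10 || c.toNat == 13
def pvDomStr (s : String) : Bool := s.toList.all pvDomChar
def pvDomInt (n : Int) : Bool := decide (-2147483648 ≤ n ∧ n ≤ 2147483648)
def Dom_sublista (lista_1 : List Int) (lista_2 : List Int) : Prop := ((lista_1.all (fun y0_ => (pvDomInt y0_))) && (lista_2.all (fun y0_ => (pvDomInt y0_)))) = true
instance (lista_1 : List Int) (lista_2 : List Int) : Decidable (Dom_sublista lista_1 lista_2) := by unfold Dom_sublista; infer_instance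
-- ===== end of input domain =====

-- B replaces A's filter-then-compare-wholesale by a different characterisation: multiset
-- equality of the member counts (two counting dicts) plus a greedy subsequence check
-- (objective: faster).

-- ===== PORT A =====
-- for i in range(len(lista_2)): if lista_2[i] in lista_1: lista_auxiliar.append(lista_2[i])
def sublista (lista_1 : List Int) (lista_2 : List Int) : Bool :=
  let lista_auxiliar :=
    (PySem.List.pyRange 0 (PySem.List.len lista_2) 1).foldl
      (fun acc i =>
        if PySem.List.pyGetD lista_2 i 0 ∈ lista_1 then acc ++ [PySem.List.pyGetD lista_2 i 0]
        else acc) []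
  if lista_1 = lista_auxiliar then true else false

-- ===== PORT B =====
-- Python's dict `==`/`!=` compares the mappings and ignores insertion order: exact hand
-- port as "same key set and the same value at every key of the first dict".
def pyDictEq (d1 d2 : PySem.Dict Int Int) : Bool :=
  PySem.Set.equal d1.keys d2.keys && d1.keys.all (fun k => d1.get? k == d2.get? k)

-- `it = iter(lista_2); all(v in it for v in lista_1)`: each `v in it` consumes the
-- iterator up to and including the first occurrence of v — exact greedy transcription.
def allInIter : List Int → List Int → Bool
  | [], _ => true
  | _ :: _, [] => false
  | v :: vs, x :: xs => if x == v then allInIter vs xs else allInIter (v :: vs) xs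

def sublista_alt (lista_1 : List Int) (lista_2 : List Int) : Bool :=
  let need : PySem.Dict Int Int :=
    lista_1.foldl (fun d v => d.insert v (d.getD v 0 + 1)) PySem.Dict.empty
  let haveD : PySem.Dict Int Int :=
    lista_2.foldl (fun d v => if need.contains v then d.insert v (d.getD v 0 + 1) else d)
      PySem.Dict.empty
  if !(pyDictEq need haveD) then false
  else allInIter lista_1 lista_2

-- ===== PRECONDITION & SPEC =====
def Spec_sublista (lista_1 : List Int) (lista_2 : List Int) (out : Bool) : Prop := out = sublista_alt lista_1 lista_2
instance (lista_1 : List Int) (lista_2 : List Int) (out : Bool) : Decidable (Spec_sublista lista_1 lista_2 out) := by unfold Spec_sublista; infer_instance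

-- ===== CLAIM (what is proved, stated in full; the proofs are below) =====
def Claim_equal_sublista : Prop := ∀ (lista_1 : List Int) (lista_2 : List Int), Dom_sublista lista_1 lista_2 → Spec_sublista lista_1 lista_2 (sublista lista_1 lista_2)

-- ===== LEMMAS AND PROOFS =====

-- A's loop builds exactly the filter of lista_2 by membership in lista_1
theorem sublista_aux_eq_filter (lista_1 lista_2 : List Int) :
    (PySem.List.pyRange 0 (PySem.List.len lista_2) 1).foldl
      (fun acc i =>
        if PySem.List.pyGetD lista_2 i 0 ∈ lista_1 then acc ++ [PySem.List.pyGetD lista_2 i 0]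
        else acc) [] = lista_2.filter (fun x => decide (x ∈ lista_1)) := by
  rw [PySem.List.foldl_pyRange_zero_pyGetD lista_2 0
        (fun acc x => if x ∈ lista_1 then acc ++ [x] else acc) []]
  induction lista_2 using List.reverseRecOn with
  | nil => simp
  | append_singleton xs x ih =>
      simp only [List.foldl_append, List.foldl_cons, List.foldl_nil, List.filter_append, ih]
      by_cases hx : x ∈ lista_1 <;> simp [hx]

-- get? of a counter dict
theorem counter_get? (xs : List Int) (v : Int) :
    (PySem.Dict.counter xs).get? v = if v ∈ xs then some (xs.count v : Int) else none := by
  by_cases h : v ∈ xs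
  · have hmem : v ∈ (PySem.Dict.counter xs).keys := by
      rw [PySem.Dict.keys_counter]; simpa [PySem.Set.mem_ofList] using h
    cases hg : (PySem.Dict.counter xs).get? v with
    | none => exact absurd hmem ((PySem.Dict.get?_eq_none_iff_not_mem_keys _ _).mp hg)
    | some c =>
        have hD := PySem.Dict.getD_counter xs v
        rw [PySem.Dict.getD_eq_get?_getD, hg] at hD
        simp only [Option.getD_some] at hD
        simp [h, hD]
  · have : (PySem.Dict.counter xs).get? v = none := by
      rw [PySem.Dict.get?_eq_none_iff_not_mem_keys, PySem.Dict.keys_counter]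
      simpa [PySem.Set.mem_ofList] using h
    simp [h, this]

-- the dict comparison succeeds exactly when the two lists are permutations of each other
theorem pyDictEq_counter (P F : List Int) :
    pyDictEq (PySem.Dict.counter P) (PySem.Dict.counter F) = true ↔ P.Perm F := by
  rw [List.perm_iff_count]
  unfold pyDictEq
  rw [Bool.and_eq_true, PySem.Set.equal_iff, List.all_eq_true]
  simp only [PySem.Dict.keys_counter, PySem.Set.mem_ofList, counter_get?, beq_iff_eq]
  constructor
  · rintro ⟨hkeys, hvals⟩ a
    by_cases ha : a ∈ P
    · have haF : a ∈ F := (hkeys a).mp ha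
      have := hvals a ha
      rw [if_pos ha, if_pos haF] at this
      exact_mod_cast Option.some.inj this
    · have haF : a ∉ F := fun hf => ha ((hkeys a).mpr hf)
      rw [List.count_eq_zero_of_not_mem ha, List.count_eq_zero_of_not_mem haF]
  · intro hcnt
    have hkeys : ∀ x, x ∈ P ↔ x ∈ F := by
      intro x
      rw [← List.count_pos_iff, ← List.count_pos_iff, hcnt]
    refine ⟨hkeys, fun k hk => ?_⟩
    rw [if_pos hk, if_pos ((hkeys k).mp hk), hcnt]

-- the consuming-iterator check is the greedy sublist test
theorem allInIter_iff (P L : List Int) : allInIter P L = true ↔ P.Sublist L := by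
  induction L generalizing P with
  | nil =>
      cases P with
      | nil => simp [allInIter]
      | cons v vs => simp [allInIter]
  | cons x xs ih =>
      cases P with
      | nil => simp [allInIter, List.nil_sublist]
      | cons v vs =>
          by_cases hxv : x = v
          · subst hxv
            simp only [allInIter, beq_self_eq_true, if_true, ih]
            exact (List.cons_sublist_cons).symm
          · simp only [allInIter, beq_iff_eq, if_neg hxv, ih]
            constructor
            · exact fun h => h.cons x
            · intro h
              cases h with
              | cons _ h' => exact h'
              | cons₂ => exact absurd rfl hxv

-- A's equality holds iff the filter is a permutation of lista_1 and lista_1 is a sublist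
theorem filter_eq_iff (P L : List Int) :
    P = L.filter (fun x => decide (x ∈ P)) ↔
      (P.Perm (L.filter (fun x => decide (x ∈ P))) ∧ P.Sublist L) := by
  constructor
  · intro h
    refine ⟨?_, ?_⟩
    · conv_rhs => rw [← h]
    · have hfs := List.filter_sublist (p := fun x => decide (x ∈ P)) (l := L)
      rwa [← h] at hfs
  · rintro ⟨hp, hs⟩
    have hsf : P.Sublist (L.filter (fun x => decide (x ∈ P))) := by
      have := hs.filter (fun x => decide (x ∈ P))
      rwa [List.filter_eq_self.mpr (by intro a ha; simpa using ha)] at this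
    exact hsf.eq_of_length hp.length_eq

-- B's two count dicts are counters of lista_1 and of the members-filter of lista_2
theorem sublista_alt_dicts (P L : List Int) :
    (L.foldl
        (fun d v =>
          if (PySem.Dict.counter P).contains v
          then d.insert v (d.getD v 0 + 1) else d)
        PySem.Dict.empty)
      = PySem.Dict.counter (L.filter (fun x => decide (x ∈ P))) := by
  have hstep : (fun (d : PySem.Dict Int Int) (v : Int) =>
        if (PySem.Dict.counter P).contains v then d.insert v (d.getD v 0 + 1) else d)
      = (fun (d : PySem.Dict Int Int) (v : Int) =>
        if decide (v ∈ P) then d.insert v (d.getD v 0 + 1) else d) := by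
    funext d v
    rw [PySem.Dict.contains_counter]
    by_cases h : v ∈ P <;> simp [h]
  rw [hstep,
    PySem.List.foldl_if_eq_foldl_filter (fun v => decide (v ∈ P))
      (fun (d : PySem.Dict Int Int) (v : Int) => d.insert v (d.getD v 0 + 1)) L PySem.Dict.empty,
    PySem.Dict.foldl_insert_getD_add_one_eq_counter]

-- ===== VERDICT (by name: the statement is the Claim_ definition above) =====
theorem sublista_spec : Claim_equal_sublista := by
  intro P L _
  unfold Spec_sublista
  show sublista P L = sublista_alt P L
  simp only [sublista, sublista_alt, sublista_aux_eq_filter]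
  rw [PySem.Dict.foldl_insert_getD_add_one_eq_counter, sublista_alt_dicts P L]
  set F := L.filter (fun x => decide (x ∈ P)) with hF
  by_cases heq : pyDictEq (PySem.Dict.counter P) (PySem.Dict.counter F) = true
  · rw [heq]
    have hperm := (pyDictEq_counter P F).mp heq
    by_cases hsub : P.Sublist L
    · rw [if_pos ((filter_eq_iff P L).mpr ⟨hperm, hsub⟩), (allInIter_iff P L).mpr hsub]
      simp
    · have h1 : ¬ (P = F) := fun h => hsub ((filter_eq_iff P L).mp h).2
      have h2 : allInIter P L = false := by
        rw [Bool.eq_false_iff]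
        exact fun hh => hsub ((allInIter_iff P L).mp hh)
      rw [if_neg h1, h2]
      simp
  · rw [Bool.not_eq_true] at heq
    have hne : P ≠ F := fun h =>
      (Bool.eq_false_iff.mp heq) ((pyDictEq_counter P F).mpr (by conv_rhs => rw [← h]))
    rw [heq, if_neg hne]
    simp
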